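-- pv_equiv track=rewrite | github.com/liuqiyucn/170N | project0/python_problem_set.py | top_sum
-- ===== SOURCE A (Python) =====
-- from math import factorial
--
-- def count_occurence(dice_combo):
--     # count the occurence of each entry in the configuration
--     occurence = {}
--     for dice_value in dice_combo:
--         if dice_value in occurence:
--             occurence[dice_value] = occurence[dice_value] + 1
--         else:
--             occurence[dice_value] = 1
--     return occurence
--
-- def count_combination(dice_side, total_dice_num, dice_combo):
--     # check if the combo list is valid
--     for dice in dice_combo:
--         if dice > dice_side:
--             raise Exception('Dice input larger than maximum side')
--         elif dice < 0:
--             raise Exception('Dice input lower than minumum side')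
--
--     # use multinomial coefficient formula to calculate the combination
--     occurence = count_occurence(dice_combo)
--     denominator = 1
--     numerator = factorial(total_dice_num)
--
--     for key, value in occurence.items():
--         denominator = denominator * factorial(value)
--
--     return numerator // denominator
--
-- def top_sum(dice_side: int, top_num : int, total_dice_num : int, target_sum : int, dice_combo : list) -> int:
--     # discard the invalid configuration
--     if len(dice_combo) == top_num and sum(dice_combo) != target_sum:
--         return 0
--     # count the number of combinations from configuration
--     if len(dice_combo) == total_dice_num:
--         return count_combination(dice_side, total_dice_num, dice_combo)
--
--     if len(dice_combo) == 0:
--         next_dice = dice_side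
--     else:
--         next_dice = dice_combo[-1]
--
--     # use dp to do recursion for all possibilities
--     # essentially we are trying all possibilities by adding one dice at a time
--     # suppose the first time we are adding the first element, then inside the next recursion function,
--     # we are adding the second allowed item specified by the next_dice range so that we are
--     # not exceeding the maximum
--     # then our base case will use count_combination() to calcuate the number of combinations
--     # of the successful combinations
--     out = 0
--     for dice in range(1, next_dice + 1):
--         dice_combo.append(dice)
--         out = out + top_sum(dice_side, top_num, total_dice_num, target_sum, dice_combo)
--         dice_combo.pop()
--     return out
-- ===== SOURCE B (Python) =====
-- from math import factorial, comb
--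
-- def top_sum(dice_side, top_num, total_dice_num, target_sum, dice_combo):
--     # Count the weighted completions of dice_combo to total_dice_num dice by a
--     # layered DP over the dice value instead of enumerating each completion.
--     n = len(dice_combo)
--     s = sum(dice_combo)
--     if n == top_num and s != target_sum:
--         return 0
--     if n == total_dice_num:
--         # multinomial coefficient: permutations of the multiset dice_combo
--         cnt = {}
--         for x in dice_combo:
--             cnt[x] = cnt.get(x, 0) + 1
--         out = factorial(total_dice_num)
--         for c in cnt.values():
--             out //= factorial(c)
--         return out
--     m = dice_side if n == 0 else dice_combo[-1]
--     if m <= 0: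
--         return 0
--     L = total_dice_num - n
--     if L < 0:
--         return 0  # no completion of the required length exists
--     # split dice_combo's counts: values in 1..m can merge with newly added dice
--     base = {}
--     outcnt = {}
--     for x in dice_combo:
--         if 1 <= x <= m:
--             base[x] = base.get(x, 0) + 1
--         else:
--             outcnt[x] = outcnt.get(x, 0) + 1
--     # fixed factor: place the out-of-range values' positions first
--     F = 1
--     slots = total_dice_num
--     for c in outcnt.values():
--         F *= comb(slots, c)
--         slots -= c
--     n_out_slots = slots  # positions left for values in 1..m
--     # top-sum constraint: reached exactly when n <= top_num <= total_dice_num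
--     if n <= top_num <= total_dice_num:
--         r0, t0 = top_num - n, target_sum - s
--     else:
--         r0, t0 = 0, None  # None = no constraint
--     if t0 is not None and not (r0 <= t0 <= r0 * m):
--         return 0  # the r0 top dice each lie in 1..m, so t0 must lie in [r0, r0*m]
--     # layered DP over the dice value v = m..1; state (used, top slots left,
--     # top sum still needed) -> summed multinomial weight (binomials telescope)
--     prebase = 0  # combo dice with value > v (already placed)
--     cur = {(0, r0, t0): 1}
--     for v in range(m, 0, -1):
--         bv = base.get(v, 0)
--         new = {}
--         for (u, r, t), w in cur.items():
--             for c in range(0, L - u + 1):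
--                 use = min(c, r)
--                 t2 = t if t is None else t - v * use
--                 key = (u + c, r - use, t2)
--                 wt = w * comb(n_out_slots - prebase - u, bv + c)
--                 new[key] = new.get(key, 0) + wt
--         prebase += bv
--         cur = new
--     out = 0
--     for (u, r, t), w in cur.items():
--         if u == L and (t is None or t == 0):
--             out += w
--     return F * out
-- ===== Notes on version B (the rewrite author's own statement) =====
-- stated objective: alternative
-- what changed: A enumerates every non-increasing completion of dice_combo by backtracking recursion (one die at a time) and computes a multinomial at each leaf; B instead runs a layered dynamic program over the dice value whose state is (dice used, top slots left, top sum still needed), merging equal states in a dict and accumulating the multinomial weights as telescoping binomial coefficients, with an up-front reachability test on the required top sum.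
-- outside the precondition, e.g. on top_sum(3, 2, 5, 1000, [5]): A returns 0, B returns 0
import Mathlib
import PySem

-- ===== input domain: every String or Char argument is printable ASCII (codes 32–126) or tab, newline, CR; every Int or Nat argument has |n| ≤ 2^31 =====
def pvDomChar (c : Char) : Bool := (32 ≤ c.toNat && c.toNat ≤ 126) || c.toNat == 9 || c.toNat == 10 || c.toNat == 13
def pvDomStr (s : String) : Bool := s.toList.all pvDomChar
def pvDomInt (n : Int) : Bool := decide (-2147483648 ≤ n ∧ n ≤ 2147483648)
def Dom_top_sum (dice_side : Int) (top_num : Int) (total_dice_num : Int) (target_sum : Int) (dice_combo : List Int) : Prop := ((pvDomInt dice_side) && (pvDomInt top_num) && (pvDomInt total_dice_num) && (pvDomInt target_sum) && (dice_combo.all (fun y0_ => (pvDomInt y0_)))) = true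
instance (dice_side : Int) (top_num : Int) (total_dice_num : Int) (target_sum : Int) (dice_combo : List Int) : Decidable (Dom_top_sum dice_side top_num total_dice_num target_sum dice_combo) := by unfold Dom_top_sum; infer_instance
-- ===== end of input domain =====

-- B replaces A's backtracking over every non-increasing completion by a layered DP over
-- the dice value with multinomial weights kept as binomials, merging equal search states
-- (objective: alternative). A appends/pops on dice_combo during the call but restores it,
-- so no caller-observable mutation remains; the equivalence is about the return value.

-- ===== PORT A =====
-- math.factorial; exact for n ≥ 0 (A only reaches it with n = len(dice_combo) ≥ 0; a
-- negative argument would raise in Python and lies outside Pre_)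
def pyFactorial (n : Int) : Int := (Nat.factorial n.toNat : Int)

def countOccurence (dice_combo : List Int) : PySem.Dict Int Int :=
  dice_combo.foldl
    (fun occ v => if occ.contains v then occ.insert v (occ.getD v 0 + 1) else occ.insert v 1)
    PySem.Dict.empty

def countCombination (dice_side : Int) (total_dice_num : Int) (dice_combo : List Int) : Int :=
  -- Python raises Exception on an out-of-range die; Pre_ excludes reaching this with one,
  -- so the 0 returned here is never the claimed value (totalisation only)
  if dice_combo.any (fun d => d > dice_side || d < 0) then 0
  else
    let occurence := countOccurence dice_combo
    let numerator := pyFactorial total_dice_num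
    let denominator := occurence.values.foldl (fun den v => den * pyFactorial v) 1
    PySem.Int.floordiv numerator denominator

-- the recursion of A, totalised with fuel; inside Pre_ the depth is at most
-- total_dice_num - len(dice_combo), so the fuel chosen in top_sum is never exhausted
def topSumRec (fuel : Nat) (dice_side : Int) (top_num : Int) (total_dice_num : Int) (target_sum : Int) (dice_combo : List Int) : Int :=
  match fuel with
  | 0 => 0
  | fuel + 1 =>
    if (dice_combo.length : Int) = top_num ∧ dice_combo.sum ≠ target_sum then 0
    else if (dice_combo.length : Int) = total_dice_num then
      countCombination dice_side total_dice_num dice_combo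
    else
      let next_dice := if dice_combo.length = 0 then dice_side else PySem.List.pyGetD dice_combo (-1) 0
      (PySem.List.pyRange 1 (next_dice + 1) 1).foldl
        (fun out dice => out + topSumRec fuel dice_side top_num total_dice_num target_sum (dice_combo ++ [dice])) 0

def top_sum (dice_side : Int) (top_num : Int) (total_dice_num : Int) (target_sum : Int) (dice_combo : List Int) : Int :=
  topSumRec ((total_dice_num - dice_combo.length).toNat + 1) dice_side top_num total_dice_num target_sum dice_combo

-- ===== PORT B =====
-- math.comb; exact for a, b ≥ 0 (every use in B under Pre_ has nonnegative arguments)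
def pyComb (a b : Int) : Int := (Nat.choose a.toNat b.toNat : Int)

def top_sum_alt (dice_side : Int) (top_num : Int) (total_dice_num : Int) (target_sum : Int) (dice_combo : List Int) : Int :=
  let n : Int := dice_combo.length
  let s : Int := dice_combo.sum
  if n = top_num ∧ s ≠ target_sum then 0
  else if n = total_dice_num then
    let cnt := dice_combo.foldl (fun d x => d.insert x (d.getD x 0 + 1)) PySem.Dict.empty
    cnt.values.foldl (fun out c => PySem.Int.floordiv out (pyFactorial c)) (pyFactorial total_dice_num)
  else
    let m := if n = 0 then dice_side else PySem.List.pyGetD dice_combo (-1) 0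
    if m ≤ 0 then 0
    else
      let L := total_dice_num - n
      if L < 0 then 0
      else
        let bo := dice_combo.foldl
          (fun (p : PySem.Dict Int Int × PySem.Dict Int Int) x =>
            if 1 ≤ x ∧ x ≤ m then (p.1.insert x (p.1.getD x 0 + 1), p.2)
            else (p.1, p.2.insert x (p.2.getD x 0 + 1)))
          (PySem.Dict.empty, PySem.Dict.empty)
        let Fs := bo.2.values.foldl (fun (q : Int × Int) c => (q.1 * pyComb q.2 c, q.2 - c)) (1, total_dice_num)
        let n_out_slots := Fs.2
        let rt : Int × Option Int :=
          if n ≤ top_num ∧ top_num ≤ total_dice_num then (top_num - n, some (target_sum - s)) else (0, none)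
        let bad : Bool := match rt.2 with
          | some tv => decide (¬(rt.1 ≤ tv ∧ tv ≤ rt.1 * m))
          | none => false
        if bad then 0
        else
        let init : PySem.Dict (Int × Int × Option Int) Int := PySem.Dict.empty.insert (0, rt.1, rt.2) 1
        let fin := (PySem.List.pyRange m 0 (-1)).foldl
          (fun (st : PySem.Dict (Int × Int × Option Int) Int × Int) v =>
            let bv := bo.1.getD v 0
            let new := st.1.items.foldl
              (fun nd (kw : (Int × Int × Option Int) × Int) =>
                (PySem.List.pyRange 0 (L - kw.1.1 + 1) 1).foldl
                  (fun nd c =>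
                    let use := min c kw.1.2.1
                    let t2 := kw.1.2.2.map (fun x => x - v * use)
                    let key := (kw.1.1 + c, kw.1.2.1 - use, t2)
                    nd.insert key (nd.getD key 0 + kw.2 * pyComb (n_out_slots - st.2 - kw.1.1) (bv + c)))
                  nd)
              PySem.Dict.empty
            (new, st.2 + bv))
          (init, 0)
        let out := fin.1.items.foldl
          (fun acc (kw : (Int × Int × Option Int) × Int) =>
            if kw.1.1 = L ∧ (kw.1.2.2 = none ∨ kw.1.2.2 = some 0) then acc + kw.2 else acc) 0
        Fs.1 * out

-- ===== PRECONDITION & SPEC =====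
-- Pre_ excludes inputs on which A raises (an out-of-range die reaching the final length,
-- or len(dice_combo) exceeding total_dice_num so that the recursion never bottoms out),
-- and with them the inputs holding an out-of-range die whose branches are all pruned by
-- the top_num check before reaching the final length — there A happens to return 0 (as
-- does B), but separating them from the raising inputs is not a closed-form condition.
def Pre_top_sum (dice_side : Int) (top_num : Int) (total_dice_num : Int) (target_sum : Int) (dice_combo : List Int) : Prop :=
  ((dice_combo.length : Int) = top_num ∧ dice_combo.sum ≠ target_sum)
  ∨ ((dice_combo.length : Int) = total_dice_num ∧ ∀ x ∈ dice_combo, 0 ≤ x ∧ x ≤ dice_side)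
  ∨ ((dice_combo.length : Int) ≠ total_dice_num ∧
      (if dice_combo.length = 0 then dice_side else PySem.List.pyGetD dice_combo (-1) 0) ≤ 0)
  ∨ ((dice_combo.length : Int) < total_dice_num ∧ ∀ x ∈ dice_combo, 0 ≤ x ∧ x ≤ dice_side)
instance (dice_side : Int) (top_num : Int) (total_dice_num : Int) (target_sum : Int) (dice_combo : List Int) : Decidable (Pre_top_sum dice_side top_num total_dice_num target_sum dice_combo) := by unfold Pre_top_sum; infer_instance

def pvWitness_top_sum : Int × Int × Int × Int × List Int := (6, 2, 3, 7, [])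

def Spec_top_sum (dice_side : Int) (top_num : Int) (total_dice_num : Int) (target_sum : Int) (dice_combo : List Int) (out : Int) : Prop := out = top_sum_alt dice_side top_num total_dice_num target_sum dice_combo
instance (dice_side : Int) (top_num : Int) (total_dice_num : Int) (target_sum : Int) (dice_combo : List Int) (out : Int) : Decidable (Spec_top_sum dice_side top_num total_dice_num target_sum dice_combo out) := by unfold Spec_top_sum; infer_instance

-- ===== CLAIM (what is proved, stated in full; the proofs are below) =====
def Claim_equal_top_sum : Prop := ∀ (dice_side : Int) (top_num : Int) (total_dice_num : Int) (target_sum : Int) (dice_combo : List Int), Dom_top_sum dice_side top_num total_dice_num target_sum dice_combo → Pre_top_sum dice_side top_num total_dice_num target_sum dice_combo → Spec_top_sum dice_side top_num total_dice_num target_sum dice_combo (top_sum dice_side top_num total_dice_num target_sum dice_combo)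

-- ===== LEMMAS AND PROOFS =====
-- ===== proof-side definitions =====

-- product of factorials of the value-multiplicities of l (denominator of the multinomial)
def denomN (l : List Int) : Nat := ((PySem.Set.ofList l).map (fun v => (l.count v).factorial)).prod

-- number of distinct orderings of the multiset l (what count_combination returns)
def WMul (l : List Int) : Nat := l.length.factorial / denomN l

-- all non-increasing dice sequences of length q with values in 1..m (A's search tree leaves)
def Exts : Int → Nat → List (List Int)
  | _, 0 => [[]]
  | m, q + 1 => (PySem.List.pyRange 1 (m + 1) 1).flatMap (fun d => (Exts d q).map (d :: ·))

-- the pruning condition: the first r added dice must sum to t (none = no constraint)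
def condB (r : Int) (t : Option Int) (e : List Int) : Bool :=
  match t with
  | none => true
  | some tv => decide ((e.take r.toNat).sum = tv)

-- common specification: the weighted count both programs compute
def SpecSum (m : Int) (q : Nat) (r : Int) (t : Option Int) (pre : List Int) : Int :=
  ((Exts m q).map (fun e => if condB r t e then (WMul (pre ++ e) : Int) else 0)).sum

-- telescoping binomial product: allocate as.head positions among S, then recurse
def ChP : Int → List Int → Int
  | _, [] => 1
  | S, a :: as => pyComb S a * ChP (S - a) as

-- ===== small generic lemmas =====

lemma foldl_mul_eq_prod {α : Type} (xs : List α) (f : α → Int) (a : Int) :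
    xs.foldl (fun den v => den * f v) a = a * (xs.map f).prod := by
  induction xs generalizing a with
  | nil => simp
  | cons x xs ih => simp [List.foldl_cons, ih, mul_assoc]

lemma prod_factorial_dvd (cs : List Nat) :
    (cs.map Nat.factorial).prod ∣ cs.sum.factorial := by
  induction cs with
  | nil => simp
  | cons c cs ih =>
    simp only [List.map_cons, List.prod_cons, List.sum_cons]
    exact mul_dvd_mul_left _ ih |>.trans (Nat.factorial_mul_factorial_dvd_factorial_add c cs.sum)

-- stepwise floor division by factorials equals one division by their product
lemma foldl_floordiv_factorial (cs : List Nat) (x : Nat)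
    (h : (cs.map Nat.factorial).prod ∣ x) :
    (cs.map (fun (c : Nat) => (c : Int))).foldl (fun out c => PySem.Int.floordiv out (pyFactorial c)) (x : Int)
      = ((x / (cs.map Nat.factorial).prod : Nat) : Int) := by
  induction cs generalizing x with
  | nil => simp
  | cons c cs ih =>
    rw [List.map_cons, List.prod_cons] at h
    have hc : Nat.factorial c ∣ x := dvd_trans (Dvd.intro _ rfl) h
    have h2 : (cs.map Nat.factorial).prod ∣ x / Nat.factorial c := by
      rcases h with ⟨k, hk⟩
      rw [mul_assoc] at hk
      refine ⟨k, ?_⟩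
      rw [hk, Nat.mul_div_cancel_left _ c.factorial_pos]
    have hfd : PySem.Int.floordiv (x : Int) (pyFactorial (c : Int)) = ((x / Nat.factorial c : Nat) : Int) := by
      simp [pyFactorial]
    rw [List.map_cons, List.foldl_cons, hfd, ih _ h2, Nat.div_div_eq_div_mul, List.map_cons, List.prod_cons]
-- telescoping: binomial chain times the factorials of its allocations and of the leftover
lemma ChP_eq (as : List Int) (S : Int) (h0 : ∀ a ∈ as, 0 ≤ a) (hs : as.sum ≤ S) (hS : 0 ≤ S) :
    ((as.map (fun a => (a.toNat.factorial : Int))).prod) * ChP S as * ((S - as.sum).toNat.factorial : Int)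
      = (S.toNat.factorial : Int) := by
  induction as generalizing S with
  | nil => simp [ChP]
  | cons a as ih =>
    have ha : 0 ≤ a := h0 a (by simp)
    have hsum : 0 ≤ as.sum := List.sum_nonneg (fun x hx => h0 x (by simp [hx]))
    have haS : a ≤ S := by
      have := hs; simp only [List.sum_cons] at this; omega
    have ih' := ih (S - a) (fun x hx => h0 x (by simp [hx]))
      (by simp only [List.sum_cons] at hs; omega) (by omega)
    simp only [List.map_cons, List.prod_cons, List.sum_cons, ChP]
    have hrw : S - (a + as.sum) = (S - a) - as.sum := by ring
    rw [hrw]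
    have hchoose : (a.toNat.factorial : Int) * pyComb S a * (((S - a).toNat).factorial : Int)
        = (S.toNat.factorial : Int) := by
      have hle : a.toNat ≤ S.toNat := by omega
      have h1 : (S - a).toNat = S.toNat - a.toNat := by omega
      have := Nat.choose_mul_factorial_mul_factorial hle
      simp only [pyComb, h1]
      push_cast
      push_cast at this
      linarith [this]
    calc (a.toNat.factorial : Int) * ((as.map (fun a => (a.toNat.factorial : Int))).prod)
          * (pyComb S a * ChP (S - a) as) * (((S - a - as.sum).toNat).factorial : Int)
        = ((a.toNat.factorial : Int) * pyComb S a)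
          * (((as.map (fun a => (a.toNat.factorial : Int))).prod) * ChP (S - a) as
              * (((S - a - as.sum).toNat).factorial : Int)) := by ring
      _ = ((a.toNat.factorial : Int) * pyComb S a) * (((S - a).toNat.factorial : Int)) := by rw [ih']
      _ = (S.toNat.factorial : Int) := hchoose

-- every extension has length q and values in 1..m
lemma mem_Exts (m : Int) (q : Nat) (e : List Int) (he : e ∈ Exts m q) :
    e.length = q ∧ ∀ x ∈ e, 1 ≤ x ∧ x ≤ m := by
  induction q generalizing m e with
  | zero => simp [Exts] at he; simp [he]
  | succ q ih =>
    simp only [Exts, List.mem_flatMap, List.mem_map] at he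
    obtain ⟨d, hd, e', he', rfl⟩ := he
    rw [PySem.List.mem_pyRange_one] at hd
    obtain ⟨hlen, hbnd⟩ := ih d e' he'
    refine ⟨by simp [hlen], ?_⟩
    intro x hx
    rcases List.mem_cons.1 hx with rfl | hx
    · omega
    · have := hbnd x hx; omega

-- Exts is empty when no value is available
lemma Exts_nonpos (m : Int) (q : Nat) (hm : m ≤ 0) : Exts m (q + 1) = [] := by
  simp [Exts, PySem.List.pyRange_one_eq_nil (show m + 1 ≤ 1 by omega)]

-- decomposition of the extension sum by the multiplicity of the top value m
lemma Exts_sum_decomp (f : List Int → Int) (m : Int) (hm : 1 ≤ m) (q : Nat) :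
    ((Exts m q).map f).sum
      = ((List.range (q + 1)).map (fun c =>
          ((Exts (m - 1) (q - c)).map (fun e => f (List.replicate c m ++ e))).sum)).sum := by
  induction q generalizing f with
  | zero => simp [Exts]
  | succ q ih =>
    have hsp : PySem.List.pyRange 1 (m + 1) 1
        = PySem.List.pyRange 1 m 1 ++ PySem.List.pyRange m (m + 1) 1 :=
      PySem.List.pyRange_one_append 1 m (m + 1) hm (by omega)
    have hstep : ((Exts m (q+1)).map f).sum
        = ((Exts (m-1) (q+1)).map f).sum + ((Exts m q).map (fun e => f (m :: e))).sum := by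
      conv_lhs => rw [show Exts m (q+1) = (PySem.List.pyRange 1 (m + 1) 1).flatMap (fun d => (Exts d q).map (d :: ·)) from rfl, hsp]
      rw [List.flatMap_append, List.map_append, List.sum_append, PySem.List.pyRange_one_singleton]
      congr 1
      · have hm1 : Exts (m - 1) (q + 1) = (PySem.List.pyRange 1 m 1).flatMap (fun d => (Exts d q).map (d :: ·)) := by
          show Exts (m-1) (q+1) = _
          rw [show Exts (m-1) (q+1) = (PySem.List.pyRange 1 ((m-1) + 1) 1).flatMap (fun d => (Exts d q).map (d :: ·)) from rfl]
          norm_num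
        rw [hm1]
      · simp [List.map_map, Function.comp_def]
    rw [hstep, ih (fun e => f (m :: e))]
    conv_rhs => rw [List.range_succ_eq_map]
    simp only [List.map_cons, List.map_map, List.sum_cons, Function.comp_def]
    have hmaps : (List.range (q + 1)).map
          (fun c => ((Exts (m - 1) (q - c)).map (fun e => f (m :: (List.replicate c m ++ e)))).sum)
        = (List.range (q + 1)).map
          (fun x => ((Exts (m - 1) (q - x)).map (fun e => f (List.replicate (x + 1) m ++ e))).sum) := by
      apply List.map_congr_left
      intro c _
      apply congrArg
      apply List.map_congr_left
      intro e _
      simp [List.replicate_succ]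
    rw [hmaps]
    simp
-- per-value allocation sizes (combo part + extension part), top value first
def allocs (fl : List Int) : Nat → List Int → List Int
  | 0, _ => []
  | v + 1, e => ((fl.count ((v : Int) + 1) : Int) + (e.count ((v : Int) + 1) : Int)) :: allocs fl v e

-- number of fl-elements above v (positions already allocated when the DP reaches value v)
def pbF (fl : List Int) (v : Int) : Int := fl.countP (fun x => decide (v < x))

-- the pure recursion the layered DP of B computes
def gSpec (fl : List Int) (L NOS : Int) : Nat → Int → Int → Option Int → Int
  | 0, u, _, t => if u = L ∧ (t = none ∨ t = some 0) then 1 else 0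
  | v + 1, u, r, t =>
    ((PySem.List.pyRange 0 (L - u + 1) 1).map (fun c =>
      pyComb (NOS - pbF fl ((v : Int) + 1) - u) ((fl.count ((v : Int) + 1) : Int) + c)
        * gSpec fl L NOS v (u + c) (r - min c r) (t.map (fun x => x - ((v : Int) + 1) * min c r)))).sum

lemma countP_lt_split (l : List Int) (v : Int) :
    l.countP (fun x => decide (v < x))
      = l.countP (fun x => decide (v + 1 < x)) + l.count (v + 1) := by
  induction l with
  | nil => simp
  | cons x l ih =>
    simp only [List.countP_cons, List.count_cons, ih]
    by_cases h1 : v + 1 < x <;> by_cases h2 : x = v + 1 <;> by_cases h3 : v < x <;>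
      simp [h1, h2, h3] <;> omega

lemma pbF_succ (fl : List Int) (v : Int) :
    pbF fl v = pbF fl (v + 1) + (fl.count (v + 1) : Int) := by
  unfold pbF
  rw [countP_lt_split fl v]
  push_cast
  ring

lemma allocs_irrel (fl : List Int) (v : Nat) (c : Nat) (x : Int) (hx : (v : Int) < x) (e : List Int) :
    allocs fl v (List.replicate c x ++ e) = allocs fl v e := by
  induction v with
  | zero => simp [allocs]
  | succ w ih =>
    have hx' : ((w : Int)) < x := by push_cast at hx ⊢; omega
    have hne : ¬((w : Int) + 1 = x) := by push_cast at hx; omega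
    have hne' : ¬(x = (w : Int) + 1) := fun h => hne h.symm
    simp only [allocs, List.count_append, List.count_replicate]
    rw [ih hx']
    simp [hne, hne']

lemma condB_rep (r : Int) (hr : 0 ≤ r) (t : Option Int) (c : Int) (hc : 0 ≤ c) (x : Int)
    (e : List Int) :
    condB r t (List.replicate c.toNat x ++ e)
      = condB (r - min c r) (t.map (fun y => y - x * min c r)) e := by
  cases t with
  | none => rfl
  | some tv =>
    simp only [condB, Option.map_some]
    have htake : (List.replicate c.toNat x ++ e).take r.toNat
        = List.replicate (min r.toNat c.toNat) x ++ e.take (r.toNat - c.toNat) := by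
      rw [List.take_append, List.take_replicate, List.length_replicate]
    have hmin : ((min r.toNat c.toNat : Nat) : Int) = min c r := by omega
    have hsub : (r.toNat - c.toNat : Nat) = (r - min c r).toNat := by omega
    rw [htake, hsub]
    simp only [List.sum_append, List.sum_replicate]
    rw [nsmul_eq_mul, hmin]
    have hcomm : min c r * x = x * min c r := mul_comm _ _
    apply decide_eq_decide.2
    constructor <;> intro h <;> omega
lemma count_Exts_top (v : Nat) (q : Nat) (e : List Int) (he : e ∈ Exts (v : Int) q) :
    e.count ((v : Int) + 1) = 0 := by
  rw [List.count_eq_zero]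
  intro hmem
  have := (mem_Exts _ _ _ he).2 _ hmem
  omega

-- closed form of the DP recursion: a weighted sum over all extensions
lemma gSpec_eq (fl : List Int) (L NOS : Int) (v : Nat) :
    ∀ (u r : Int) (t : Option Int), 0 ≤ u → u ≤ L → 0 ≤ r →
    gSpec fl L NOS v u r t
      = ((Exts (v : Int) (L - u).toNat).map (fun e =>
          if condB r t e then ChP (NOS - pbF fl (v : Int) - u) (allocs fl v e) else 0)).sum := by
  induction v with
  | zero =>
    intro u r t hu0 huL hr0
    simp only [Nat.cast_zero]
    by_cases hu : u = L
    · subst hu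
      simp only [sub_self, Int.toNat_zero]
      have h0 : Exts (0 : Int) 0 = [[]] := rfl
      rw [h0]
      simp only [List.map_cons, List.map_nil, List.sum_cons, List.sum_nil, add_zero]
      cases t with
      | none => simp [gSpec, condB, allocs, ChP]
      | some tv =>
        by_cases htv : tv = 0
        · subst htv; simp [gSpec, condB, allocs, ChP]
        · simp [gSpec, condB, allocs, ChP, htv, Ne.symm htv]
    · obtain ⟨q, hq⟩ : ∃ q, (L - u).toNat = q + 1 := ⟨(L - u).toNat - 1, by omega⟩
      rw [hq, Exts_nonpos _ _ (by omega)]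
      simp [gSpec, hu]
  | succ v ih =>
    intro u r t hu0 huL hr0
    have hq1 : (L - u + 1 - 0).toNat = (L - u).toNat + 1 := by omega
    rw [show gSpec fl L NOS (v + 1) u r t
        = ((PySem.List.pyRange 0 (L - u + 1) 1).map (fun c =>
            pyComb (NOS - pbF fl ((v : Int) + 1) - u) ((fl.count ((v : Int) + 1) : Int) + c)
              * gSpec fl L NOS v (u + c) (r - min c r)
                  (t.map (fun x => x - ((v : Int) + 1) * min c r)))).sum from rfl]
    rw [PySem.List.pyRange_one 0 (L - u + 1), hq1, List.map_map]
    have hcast : ((v + 1 : Nat) : Int) = (v : Int) + 1 := by push_cast; ring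
    rw [hcast]
    rw [Exts_sum_decomp _ ((v : Int) + 1) (by omega) ((L - u).toNat)]
    have hm1 : ((v : Int) + 1) - 1 = (v : Int) := by ring
    rw [hm1]
    apply congrArg
    apply List.map_congr_left
    intro c hc
    rw [List.mem_range] at hc
    simp only [Function.comp_def, zero_add]
    have hc0 : (0 : Int) ≤ (c : Int) := by positivity
    have hucL : u + (c : Int) ≤ L := by omega
    rw [ih (u + (c : Int)) (r - min (c : Int) r)
        (t.map (fun x => x - ((v : Int) + 1) * min (c : Int) r)) (by omega) hucL (by omega)]
    have hqq : (L - (u + (c : Int))).toNat = (L - u).toNat - c := by omega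
    rw [hqq, ← List.sum_map_mul_left]
    apply congrArg
    apply List.map_congr_left
    intro e he
    have hcnt : e.count ((v : Int) + 1) = 0 := count_Exts_top v _ e he
    -- condition decomposition
    have hcond := condB_rep r hr0 t (c : Int) hc0 ((v : Int) + 1) e
    rw [Int.toNat_natCast] at hcond
    rw [← hcond]
    -- allocation decomposition
    have halloc : allocs fl (v + 1) (List.replicate c ((v : Int) + 1) ++ e)
        = ((fl.count ((v : Int) + 1) : Int) + (c : Int)) :: allocs fl v e := by
      simp only [allocs, List.count_append, List.count_replicate, hcnt]
      rw [allocs_irrel fl v c ((v : Int) + 1) (by omega) e]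
      simp
    have hslots : (NOS - pbF fl ((v : Int) + 1) - u) - ((fl.count ((v : Int) + 1) : Int) + (c : Int))
        = NOS - pbF fl (v : Int) - (u + (c : Int)) := by
      rw [pbF_succ fl (v : Int)]
      ring
    rw [mul_ite, mul_zero]
    by_cases hcb : condB r t (List.replicate c ((v : Int) + 1) ++ e) = true
    · rw [if_pos hcb, if_pos hcb, halloc]
      rw [show ChP (NOS - pbF fl ((v : Int) + 1) - u)
            (((fl.count ((v : Int) + 1) : Int) + (c : Int)) :: allocs fl v e)
          = pyComb (NOS - pbF fl ((v : Int) + 1) - u) ((fl.count ((v : Int) + 1) : Int) + (c : Int))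
            * ChP ((NOS - pbF fl ((v : Int) + 1) - u) - ((fl.count ((v : Int) + 1) : Int) + (c : Int)))
                (allocs fl v e) from rfl]
      rw [hslots]
    · rw [if_neg hcb, if_neg hcb]
-- weighted sum of a dict's items (the quantity the layered DP preserves)
def sumItems {K : Type} (l : List (K × Int)) (φ : K → Int) : Int :=
  (l.map (fun kw => kw.2 * φ kw.1)).sum

lemma sumItems_append {K : Type} (l1 l2 : List (K × Int)) (φ : K → Int) :
    sumItems (l1 ++ l2) φ = sumItems l1 φ + sumItems l2 φ := by
  simp [sumItems]

lemma sumItems_replace {K : Type} [BEq K] [LawfulBEq K] (φ : K → Int) (l : List (K × Int))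
    (k : K) (v w : Int) (hnd : (l.map (·.1)).Nodup) (hmem : (k, v) ∈ l) :
    sumItems (l.map (fun p => if p.1 == k then (k, v + w) else p)) φ
      = sumItems l φ + w * φ k := by
  induction l with
  | nil => simp at hmem
  | cons p l ih =>
    simp only [List.map_cons, List.nodup_cons] at hnd
    by_cases hpk : p.1 = k
    · have hp : p = (k, v) := by
        rcases List.mem_cons.1 hmem with h | h
        · exact h.symm
        · exact absurd (by rw [hpk]; exact List.mem_map.2 ⟨(k, v), h, rfl⟩) hnd.1
      have hrest : l.map (fun p => if p.1 == k then (k, v + w) else p) = l := by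
        conv_rhs => rw [← List.map_id l]
        apply List.map_congr_left
        intro q hq
        have hqk : q.1 ≠ k := by
          intro hh
          exact hnd.1 (by rw [hpk, ← hh]; exact List.mem_map.2 ⟨q, hq, rfl⟩)
        simp [hqk]
      simp only [List.map_cons, hrest, hp]
      simp only [sumItems, List.map_cons, List.sum_cons, beq_self_eq_true, if_pos]
      ring
    · have hne : (p.1 == k) = false := beq_eq_false_iff_ne.2 hpk
      have hmem' : (k, v) ∈ l := by
        rcases List.mem_cons.1 hmem with h | h
        · exact absurd (by rw [← h]) hpk
        · exact h
      simp only [List.map_cons, hne, if_neg, Bool.false_eq_true, not_false_iff]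
      simp only [sumItems, List.map_cons, List.sum_cons] at ih ⊢
      rw [ih hnd.2 hmem']
      ring

-- adding w at key k changes the weighted sum by w * φ k and keeps keys unique
lemma sumItems_insert_add {K : Type} [BEq K] [LawfulBEq K] (d : PySem.Dict K Int)
    (hnd : d.keys.Nodup) (k : K) (w : Int) (φ : K → Int) :
    sumItems (d.insert k (d.getD k 0 + w)).items φ = sumItems d.items φ + w * φ k := by
  by_cases hc : d.contains k
  · obtain ⟨v, hv⟩ : ∃ v, d.get? k = some v := by
      have := PySem.Dict.contains_eq_isSome_get? (d := d) (k := k)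
      rw [hc] at this
      exact Option.isSome_iff_exists.1 this.symm
    have hgd : d.getD k 0 = v := PySem.Dict.getD_of_get?_eq_some d 0 hv
    have hmem : (k, v) ∈ d.items := PySem.Dict.mem_items_of_get?_eq_some d hv
    rw [PySem.Dict.items_insert_of_contains d _ hc, hgd]
    exact sumItems_replace φ d.items k v w hnd hmem
  · rw [PySem.Dict.items_insert_of_not_contains d _ (by simpa using hc)]
    rw [sumItems_append]
    rw [PySem.Dict.getD_of_not_contains d _ (by simpa using hc)]
    simp [sumItems]
-- a fold of additive updates: total weighted sum grows by the added contributions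
lemma foldl_addkeys {α K : Type} [BEq K] [LawfulBEq K] (key : α → K) (wt : α → Int)
    (φ : K → Int) (cs : List α) :
    ∀ (nd : PySem.Dict K Int), nd.keys.Nodup →
      (cs.foldl (fun nd c => nd.insert (key c) (nd.getD (key c) 0 + wt c)) nd).keys.Nodup
      ∧ sumItems (cs.foldl (fun nd c => nd.insert (key c) (nd.getD (key c) 0 + wt c)) nd).items φ
          = sumItems nd.items φ + (cs.map (fun c => wt c * φ (key c))).sum := by
  induction cs with
  | nil => intro nd hnd; exact ⟨hnd, by simp⟩
  | cons c cs ih =>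
    intro nd hnd
    simp only [List.foldl_cons, List.map_cons, List.sum_cons]
    obtain ⟨h1, h2⟩ := ih (nd.insert (key c) (nd.getD (key c) 0 + wt c))
      (PySem.Dict.nodup_keys_insert _ _ _ hnd)
    refine ⟨h1, ?_⟩
    rw [h2, sumItems_insert_add nd hnd (key c) (wt c) φ]
    ring

-- two nested folds of additive updates
lemma foldl_addkeys2 {β α K : Type} [BEq K] [LawfulBEq K] (cs : β → List α) (key : β → α → K)
    (wt : β → α → Int) (φ : K → Int) (l : List β) :
    ∀ (nd : PySem.Dict K Int), nd.keys.Nodup →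
      (l.foldl (fun nd b => (cs b).foldl
          (fun nd c => nd.insert (key b c) (nd.getD (key b c) 0 + wt b c)) nd) nd).keys.Nodup
      ∧ sumItems (l.foldl (fun nd b => (cs b).foldl
          (fun nd c => nd.insert (key b c) (nd.getD (key b c) 0 + wt b c)) nd) nd).items φ
          = sumItems nd.items φ
            + (l.map (fun b => ((cs b).map (fun c => wt b c * φ (key b c))).sum)).sum := by
  induction l with
  | nil => intro nd hnd; exact ⟨hnd, by simp⟩
  | cons b l ih =>
    intro nd hnd
    simp only [List.foldl_cons, List.map_cons, List.sum_cons]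
    obtain ⟨h1, h2⟩ := foldl_addkeys (key b) (wt b) φ (cs b) nd hnd
    obtain ⟨h3, h4⟩ := ih _ h1
    refine ⟨h3, ?_⟩
    rw [h4, h2]
    ring

-- the final readout loop is a weighted sum against an indicator
lemma readout_eq {K : Type} (p : K → Prop) [DecidablePred p] (l : List (K × Int)) :
    ∀ acc : Int, l.foldl (fun acc kw => if p kw.1 then acc + kw.2 else acc) acc
      = acc + sumItems l (fun k => if p k then 1 else 0) := by
  induction l with
  | nil => intro acc; simp [sumItems]
  | cons kw l ih =>
    intro acc
    simp only [List.foldl_cons, sumItems, List.map_cons, List.sum_cons]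
    by_cases h : p kw.1
    · rw [if_pos h, ih, if_pos h]; simp only [sumItems]; ring
    · rw [if_neg h, ih, if_neg h]; simp only [sumItems]; ring
-- the layered dict loop of B computes the pure recursion gSpec
lemma loop_eq (fl : List Int) (L NOS : Int) (b : PySem.Dict Int Int)
    (hb : ∀ w : Int, b.getD w 0 = (fl.count w : Int)) :
    ∀ (vn : Nat) (pb0 : Int) (hpb : pb0 = pbF fl (vn : Int))
      (cur : PySem.Dict (Int × Int × Option Int) Int), cur.keys.Nodup →
    (((PySem.List.pyRange (vn : Int) 0 (-1)).foldl
        (fun (st : PySem.Dict (Int × Int × Option Int) Int × Int) v =>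
          (st.1.items.foldl
            (fun nd (kw : (Int × Int × Option Int) × Int) =>
              (PySem.List.pyRange 0 (L - kw.1.1 + 1) 1).foldl
                (fun nd c =>
                  nd.insert (kw.1.1 + c, kw.1.2.1 - min c kw.1.2.1,
                      kw.1.2.2.map (fun x => x - v * min c kw.1.2.1))
                    (nd.getD (kw.1.1 + c, kw.1.2.1 - min c kw.1.2.1,
                        kw.1.2.2.map (fun x => x - v * min c kw.1.2.1)) 0
                      + kw.2 * pyComb (NOS - st.2 - kw.1.1) (b.getD v 0 + c)))
                nd)
            PySem.Dict.empty, st.2 + b.getD v 0))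
        (cur, pb0)).1.items.foldl
      (fun acc (kw : (Int × Int × Option Int) × Int) =>
        if kw.1.1 = L ∧ (kw.1.2.2 = none ∨ kw.1.2.2 = some 0) then acc + kw.2 else acc) 0)
    = sumItems cur.items (fun key => gSpec fl L NOS vn key.1 key.2.1 key.2.2) := by
  intro vn
  induction vn with
  | zero =>
    intro pb0 hpb cur hnd
    rw [PySem.List.pyRange_neg_one_eq_nil (by norm_num)]
    simp only [List.foldl_nil]
    rw [readout_eq (fun key : Int × Int × Option Int => key.1 = L ∧ (key.2.2 = none ∨ key.2.2 = some 0)) cur.items 0]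
    rw [zero_add]
    rfl
  | succ vn ih =>
    intro pb0 hpb cur hnd
    subst hpb
    have hpos : (0 : Int) < ((vn + 1 : Nat) : Int) := by positivity
    rw [PySem.List.pyRange_neg_one_cons hpos, List.foldl_cons]
    have hcast : ((vn + 1 : Nat) : Int) - 1 = (vn : Nat) := by push_cast; ring
    obtain ⟨hnodup, hsum⟩ := foldl_addkeys2
      (cs := fun kw : (Int × Int × Option Int) × Int => PySem.List.pyRange 0 (L - kw.1.1 + 1) 1)
      (key := fun kw c => (kw.1.1 + c, kw.1.2.1 - min c kw.1.2.1,
          kw.1.2.2.map (fun x => x - ((vn + 1 : Nat) : Int) * min c kw.1.2.1)))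
      (wt := fun kw c => kw.2 * pyComb (NOS - pbF fl ((vn + 1 : Nat) : Int) - kw.1.1)
          (b.getD ((vn + 1 : Nat) : Int) 0 + c))
      (φ := fun key => gSpec fl L NOS vn key.1 key.2.1 key.2.2)
      (l := cur.items) PySem.Dict.empty PySem.Dict.nodup_keys_empty
    have hpb : pbF fl ((vn + 1 : Nat) : Int) + b.getD ((vn + 1 : Nat) : Int) 0 = pbF fl ((vn : Nat) : Int) := by
      rw [hb]
      have := pbF_succ fl ((vn : Nat) : Int)
      push_cast at this ⊢
      omega
    rw [show (pbF fl ((vn + 1 : Nat) : Int) + b.getD ((vn + 1 : Nat) : Int) 0) = pbF fl ((vn : Nat) : Int) from hpb] at *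
    rw [hcast, ih _ rfl _ hnodup, hsum]
    have h0 : sumItems (PySem.Dict.empty : PySem.Dict (Int × Int × Option Int) Int).items
        (fun key => gSpec fl L NOS vn key.1 key.2.1 key.2.2) = 0 := rfl
    rw [h0, zero_add]
    simp only [sumItems]
    apply congrArg
    apply List.map_congr_left
    intro kw _
    have hstep : ((PySem.List.pyRange 0 (L - kw.1.1 + 1) 1).map (fun c =>
        (kw.2 * pyComb (NOS - pbF fl ((vn + 1 : Nat) : Int) - kw.1.1) (b.getD ((vn + 1 : Nat) : Int) 0 + c))
          * gSpec fl L NOS vn (kw.1.1 + c) (kw.1.2.1 - min c kw.1.2.1)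
              (kw.1.2.2.map (fun x => x - ((vn + 1 : Nat) : Int) * min c kw.1.2.1)))).sum
        = kw.2 * gSpec fl L NOS (vn + 1) kw.1.1 kw.1.2.1 kw.1.2.2 := by
      have hg : gSpec fl L NOS (vn + 1) kw.1.1 kw.1.2.1 kw.1.2.2
          = ((PySem.List.pyRange 0 (L - kw.1.1 + 1) 1).map (fun c =>
              pyComb (NOS - pbF fl ((vn : Int) + 1) - kw.1.1) ((fl.count ((vn : Int) + 1) : Int) + c)
                * gSpec fl L NOS vn (kw.1.1 + c) (kw.1.2.1 - min c kw.1.2.1)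
                    (kw.1.2.2.map (fun x => x - ((vn : Int) + 1) * min c kw.1.2.1)))).sum := rfl
      rw [hg, ← List.sum_map_mul_left]
      apply congrArg
      apply List.map_congr_left
      intro c _
      rw [hb]
      have hc1 : ((vn + 1 : Nat) : Int) = (vn : Int) + 1 := by push_cast; ring
      rw [hc1]
      ring
    rw [hstep]

-- products over lists with the same distinct elements agree
lemma prod_perm_of_nodup {M : Type} [CommMonoid M] (l1 l2 : List Int) (f : Int → M)
    (h1 : l1.Nodup) (h2 : l2.Nodup) (hm : ∀ x, x ∈ l1 ↔ x ∈ l2) :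
    (l1.map f).prod = (l2.map f).prod :=
  ((List.perm_ext_iff_of_nodup h1 h2).2 hm).map f |>.prod_eq

-- the distinct values of l, each weighted by its multiplicity, exhaust l
lemma sum_counts_ofList (l : List Int) :
    ((PySem.Set.ofList l).map (fun v => l.count v)).sum = l.length := by
  have hp : ((PySem.Set.ofList l).map (fun v => l.count v)).sum
      = (l.dedup.map (fun v => l.count v)).sum := by
    exact (((List.perm_ext_iff_of_nodup (PySem.Set.nodup_ofList l) l.nodup_dedup).2
      (fun x => by rw [PySem.Set.mem_ofList, List.mem_dedup])).map _).sum_eq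
  rw [hp]
  exact List.sum_map_count_dedup_eq_length l

lemma denomN_dvd (l : List Int) : denomN l ∣ l.length.factorial := by
  have h := prod_factorial_dvd ((PySem.Set.ofList l).map (fun v => l.count v))
  rw [sum_counts_ofList] at h
  simpa [denomN, List.map_map, Function.comp_def] using h

-- B's repeated floor divisions of the counter values compute the multinomial
lemma alt_multinomial (l : List Int) :
    (PySem.Dict.counter l).values.foldl (fun out c => PySem.Int.floordiv out (pyFactorial c))
        (pyFactorial (l.length : Int))
      = (WMul l : Int) := by
  have hv : (PySem.Dict.counter l).values
      = (((PySem.Set.ofList l).map (fun v => l.count v)).map (fun (c : Nat) => (c : Int))) := by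
    show ((PySem.Dict.counter l).items).map (·.2) = _
    rw [PySem.Dict.items_counter]
    simp [List.map_map, Function.comp_def]
  rw [hv]
  have hfac : pyFactorial ((l.length : Nat) : Int) = ((l.length.factorial : Nat) : Int) := by
    simp [pyFactorial]
  rw [hfac, foldl_floordiv_factorial _ _ (by
    have := denomN_dvd l
    simpa [denomN, List.map_map, Function.comp_def] using this)]
  simp [WMul, denomN, List.map_map, Function.comp_def]

-- A's count_combination computes the multinomial on valid input
lemma countCombination_eq (side N : Int) (l : List Int)
    (hval : ∀ x ∈ l, 0 ≤ x ∧ x ≤ side) (hN : (l.length : Int) = N) :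
    countCombination side N l = (WMul l : Int) := by
  unfold countCombination
  rw [if_neg (by
    simp only [List.any_eq_true, Bool.or_eq_true, decide_eq_true_eq]
    rintro ⟨d, hd, hor⟩
    have := hval d hd
    omega)]
  have hocc : countOccurence l = PySem.Dict.counter l := by
    unfold countOccurence
    rw [PySem.List.foldl_congr_mem l
        (fun (occ : PySem.Dict Int Int) v => if occ.contains v then occ.insert v (occ.getD v 0 + 1) else occ.insert v 1)
        (fun (occ : PySem.Dict Int Int) v => occ.insert v (occ.getD v 0 + 1)) PySem.Dict.empty
      (fun occ v _ => by
        by_cases hc : occ.contains v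
        · simp [hc]
        · have h0 : occ.getD v 0 = 0 := PySem.Dict.getD_of_not_contains occ 0 (by simpa using hc)
          simp [hc, h0])]
    exact PySem.Dict.foldl_insert_getD_add_one_eq_counter l
  rw [hocc]
  have hv : (PySem.Dict.counter l).values
      = (((PySem.Set.ofList l).map (fun v => l.count v)).map (fun (c : Nat) => (c : Int))) := by
    show ((PySem.Dict.counter l).items).map (·.2) = _
    rw [PySem.Dict.items_counter]
    simp [List.map_map, Function.comp_def]
  have hden : (PySem.Dict.counter l).values.foldl (fun den v => den * pyFactorial v) 1
      = ((denomN l : Nat) : Int) := by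
    rw [hv, List.foldl_map, foldl_mul_eq_prod _ (fun c => pyFactorial ((c : Nat) : Int)), one_mul]
    have h1 : ((PySem.Set.ofList l).map (fun v => l.count v)).map (fun (c : Nat) => pyFactorial ((c : Nat) : Int))
        = (((PySem.Set.ofList l).map (fun v => l.count v)).map Nat.factorial).map (Nat.cast : Nat → Int) := by
      simp [List.map_map, Function.comp_def, pyFactorial]
    rw [h1, ← Nat.cast_list_prod]
    simp [denomN, List.map_map, Function.comp_def]
  show PySem.Int.floordiv (pyFactorial N) ((PySem.Dict.counter l).values.foldl (fun den v => den * pyFactorial v) 1) = _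
  rw [hden, ← hN]
  have hfac : pyFactorial ((l.length : Nat) : Int) = ((l.length.factorial : Nat) : Int) := by
    simp [pyFactorial]
  rw [hfac, PySem.Int.floordiv_natCast]
  rfl
-- B's running-slots loop for the out-of-range values is a binomial chain
lemma fold_FCHP (cs : List Int) : ∀ (S acc : Int),
    cs.foldl (fun (q : Int × Int) c => (q.1 * pyComb q.2 c, q.2 - c)) (acc, S)
      = (acc * ChP S cs, S - cs.sum) := by
  induction cs with
  | nil => intro S acc; simp [ChP]
  | cons c cs ih =>
    intro S acc
    simp only [List.foldl_cons, List.sum_cons, ih (S - c) (acc * pyComb S c), ChP,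
      Prod.mk.injEq]
    constructor <;> ring

-- the two-dict loop of B splits into two counter loops
lemma bo_split (m : Int) : ∀ (l : List Int) (d1 d2 : PySem.Dict Int Int),
    l.foldl (fun (p : PySem.Dict Int Int × PySem.Dict Int Int) x =>
        if 1 ≤ x ∧ x ≤ m then (p.1.insert x (p.1.getD x 0 + 1), p.2)
        else (p.1, p.2.insert x (p.2.getD x 0 + 1))) (d1, d2)
      = ((l.filter (fun x => decide (1 ≤ x ∧ x ≤ m))).foldl (fun d x => d.insert x (d.getD x 0 + 1)) d1,
         (l.filter (fun x => !decide (1 ≤ x ∧ x ≤ m))).foldl (fun d x => d.insert x (d.getD x 0 + 1)) d2) := by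
  intro l
  induction l with
  | nil => intro d1 d2; simp
  | cons x l ih =>
    intro d1 d2
    by_cases hx : 1 ≤ x ∧ x ≤ m
    · simp only [List.foldl_cons, List.filter_cons, if_pos hx, decide_eq_true hx]
      simp only [Bool.not_true, Bool.false_eq_true, if_neg (by simp : ¬(false = true))]
      exact ih _ _
    · simp only [List.foldl_cons, List.filter_cons, if_neg hx, decide_eq_false hx]
      simp only [Bool.not_false, if_pos rfl, Bool.false_eq_true, if_neg (by simp : ¬(false = true))]
      exact ih _ _

lemma countP_le_succ (l : List Int) (v : Int) (hv : 0 ≤ v) :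
    l.countP (fun x => decide (1 ≤ x ∧ x ≤ v + 1))
      = l.countP (fun x => decide (1 ≤ x ∧ x ≤ v)) + l.count (v + 1) := by
  induction l with
  | nil => simp
  | cons x l ih =>
    rw [List.countP_cons, List.countP_cons, List.count_cons, ih]
    by_cases h1 : 1 ≤ x ∧ x ≤ v + 1
    · by_cases h3 : x = v + 1
      · have h2 : ¬(1 ≤ x ∧ x ≤ v) := by omega
        rw [decide_eq_true h1, decide_eq_false h2]
        simp only [beq_iff_eq, if_pos h3]
        simp
        try omega
      · have h2 : 1 ≤ x ∧ x ≤ v := by omega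
        rw [decide_eq_true h1, decide_eq_true h2]
        simp only [beq_iff_eq, if_neg h3]
        simp
        try omega
    · have h2 : ¬(1 ≤ x ∧ x ≤ v) := by omega
      have h3 : ¬(x = v + 1) := by omega
      rw [decide_eq_false h1, decide_eq_false h2]
      simp only [beq_iff_eq, if_neg h3]
      simp
      try omega

lemma allocs_sum (fl e : List Int) : ∀ (v : Nat),
    (allocs fl v e).sum
      = (fl.countP (fun x => decide (1 ≤ x ∧ x ≤ (v : Int))) : Int)
        + (e.countP (fun x => decide (1 ≤ x ∧ x ≤ (v : Int))) : Int) := by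
  intro v
  induction v with
  | zero =>
    have hz : ∀ (l : List Int), l.countP (fun x => decide (1 ≤ x ∧ x ≤ ((0 : Nat) : Int))) = 0 := by
      intro l
      rw [List.countP_eq_zero]
      intro x _
      simp only [decide_eq_true_eq]
      omega
    rw [show allocs fl 0 e = [] from rfl, List.sum_nil, hz, hz]
    simp
  | succ v ih =>
    have hc : ((v + 1 : Nat) : Int) = (v : Int) + 1 := by push_cast; ring
    rw [show allocs fl (v + 1) e
        = ((fl.count ((v : Int) + 1) : Int) + (e.count ((v : Int) + 1) : Int)) :: allocs fl v e from rfl]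
    rw [List.sum_cons, ih, hc, countP_le_succ fl (v : Int) (by positivity),
      countP_le_succ e (v : Int) (by positivity)]
    push_cast
    ring

lemma allocs_nonneg (fl e : List Int) : ∀ (v : Nat), ∀ a ∈ allocs fl v e, 0 ≤ a := by
  intro v
  induction v with
  | zero => simp [allocs]
  | succ v ih =>
    intro a ha
    rcases List.mem_cons.1 ha with rfl | ha
    · positivity
    · exact ih a ha

lemma allocs_factprod (fl e : List Int) : ∀ (v : Nat),
    ((allocs fl v e).map (fun a => (a.toNat.factorial : Int))).prod
      = ((PySem.List.pyRange 1 ((v : Int) + 1) 1).map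
          (fun w => (((fl.count w + e.count w).factorial : Nat) : Int))).prod := by
  intro v
  induction v with
  | zero =>
    rw [PySem.List.pyRange_one_eq_nil (by norm_num)]
    simp [allocs]
  | succ v ih =>
    have hc : ((v + 1 : Nat) : Int) = (v : Int) + 1 := by push_cast; ring
    have hsplit : PySem.List.pyRange 1 (((v : Int) + 1) + 1) 1
        = PySem.List.pyRange 1 ((v : Int) + 1) 1 ++ [(v : Int) + 1] :=
      PySem.List.pyRange_one_succ_right (by omega)
    simp only [allocs, List.map_cons, List.prod_cons, hc, hsplit, List.map_append, List.prod_append,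
      List.map_cons, List.prod_cons, List.map_nil, List.prod_nil, ih]
    have htn : ((fl.count ((v : Int) + 1) : Int) + (e.count ((v : Int) + 1) : Int)).toNat
        = fl.count ((v : Int) + 1) + e.count ((v : Int) + 1) := by omega
    rw [htn]
    ring

-- extend a product over the distinct values to a superset where the factor is 1
lemma prod_ext_ones (S S' : List Int) (f : Int → Int) (h1 : S.Nodup) (h2 : S'.Nodup)
    (hsub : ∀ v ∈ S, v ∈ S') (hone : ∀ v ∈ S', v ∉ S → f v = 1) :
    (S.map f).prod = (S'.map f).prod := by
  classical
  have hperm : (S'.filter (fun v => decide (v ∈ S)) ++ S'.filter (fun v => !decide (v ∈ S))).Perm S' :=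
    List.filter_append_perm _ S'
  have h3 : (S'.map f).prod = ((S'.filter (fun v => decide (v ∈ S))).map f).prod
      * ((S'.filter (fun v => !decide (v ∈ S))).map f).prod := by
    rw [← List.prod_append, ← List.map_append]
    exact ((hperm.map f).prod_eq).symm
  have h4 : ((S'.filter (fun v => !decide (v ∈ S))).map f).prod = 1 := by
    apply List.prod_eq_one
    intro x hx
    rw [List.mem_map] at hx
    obtain ⟨v, hv, rfl⟩ := hx
    rw [List.mem_filter] at hv
    exact hone v hv.1 (by simpa using hv.2)
  have h5 : ((S'.filter (fun v => decide (v ∈ S))).map f).prod = (S.map f).prod := by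
    apply prod_perm_of_nodup _ _ f (h2.filter _) h1
    intro x
    rw [List.mem_filter]
    simp only [decide_eq_true_eq]
    exact ⟨fun h => h.2, fun h => ⟨hsub x h, h⟩⟩
  rw [h3, h4, h5, mul_one]
lemma denomN_pos (l : List Int) : 0 < denomN l := by
  apply List.prod_pos
  intro a ha
  rw [List.mem_map] at ha
  obtain ⟨v, _, rfl⟩ := ha
  exact Nat.factorial_pos _

-- the multinomial denominator of combo ++ e splits into the out-of-range part and
-- the per-value allocations over 1..m
lemma denomN_split (combo e : List Int) (m : Int) (hm : 1 ≤ m)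
    (hev : ∀ x ∈ e, 1 ≤ x ∧ x ≤ m) :
    ((denomN (combo ++ e) : Nat) : Int)
      = ((PySem.Set.ofList (combo.filter (fun x => !decide (1 ≤ x ∧ x ≤ m)))).map
            (fun v => ((((combo.filter (fun x => !decide (1 ≤ x ∧ x ≤ m))).count v).factorial : Nat) : Int))).prod
        * ((PySem.List.pyRange 1 (m + 1) 1).map
            (fun w => ((((combo.filter (fun x => decide (1 ≤ x ∧ x ≤ m))).count w + e.count w).factorial : Nat) : Int))).prod := by
  set P : Int → Bool := fun x => decide (1 ≤ x ∧ x ≤ m) with hP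
  set l := combo ++ e with hl
  set fl := combo.filter P with hfl
  set ol := combo.filter (fun x => !P x) with hol
  have hPe : ∀ x ∈ e, P x = true := by
    intro x hx
    have := hev x hx
    simp only [hP, decide_eq_true_eq]
    exact this
  have hcast : ((denomN l : Nat) : Int)
      = ((PySem.Set.ofList l).map (fun v => (((l.count v).factorial : Nat) : Int))).prod := by
    rw [denomN, Nat.cast_list_prod]
    simp [List.map_map, Function.comp_def]
  rw [hcast]
  -- split the distinct values by P
  have hsplit : ((PySem.Set.ofList l).map (fun v => (((l.count v).factorial : Nat) : Int))).prod
      = (((PySem.Set.ofList l).filter P).map (fun v => (((l.count v).factorial : Nat) : Int))).prod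
        * (((PySem.Set.ofList l).filter (fun v => !P v)).map (fun v => (((l.count v).factorial : Nat) : Int))).prod := by
    rw [← List.prod_append, ← List.map_append]
    exact ((List.filter_append_perm P (PySem.Set.ofList l)).map _).prod_eq.symm
  rw [hsplit, mul_comm]
  congr 1
  · -- out-of-range part
    have hcongr : (((PySem.Set.ofList l).filter (fun v => !P v)).map
          (fun v => (((l.count v).factorial : Nat) : Int))).prod
        = (((PySem.Set.ofList l).filter (fun v => !P v)).map
          (fun v => (((ol.count v).factorial : Nat) : Int))).prod := by
      apply congrArg
      apply List.map_congr_left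
      intro v hv
      rw [List.mem_filter] at hv
      have hvP : P v = false := by simpa using hv.2
      have hce : e.count v = 0 := by
        rw [List.count_eq_zero]
        intro hve
        rw [hPe v hve] at hvP
        exact absurd hvP (by simp)
      have hcc : combo.count v = ol.count v := by
        rw [hol, List.count_filter]
        simp [hvP]
      rw [hl, List.count_append, hce, hcc]
      simp
    rw [hcongr]
    apply prod_perm_of_nodup
    · exact (PySem.Set.nodup_ofList l).filter _
    · exact PySem.Set.nodup_ofList ol
    · intro x
      rw [List.mem_filter, PySem.Set.mem_ofList, PySem.Set.mem_ofList, hol, List.mem_filter]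
      constructor
      · rintro ⟨hxl, hxP⟩
        rw [hl, List.mem_append] at hxl
        rcases hxl with h | h
        · exact ⟨h, hxP⟩
        · rw [hPe x h] at hxP
          exact absurd hxP (by simp)
      · rintro ⟨hxc, hxP⟩
        exact ⟨by rw [hl, List.mem_append]; exact Or.inl hxc, hxP⟩
  · -- in-range part
    have hcongr : (((PySem.Set.ofList l).filter P).map
          (fun v => (((l.count v).factorial : Nat) : Int))).prod
        = (((PySem.Set.ofList l).filter P).map
          (fun w => (((fl.count w + e.count w).factorial : Nat) : Int))).prod := by
      apply congrArg
      apply List.map_congr_left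
      intro v hv
      rw [List.mem_filter] at hv
      have hcc : combo.count v = fl.count v := by
        rw [hfl, List.count_filter]
        simp [hv.2]
      rw [hl, List.count_append, hcc]
    rw [hcongr]
    apply prod_ext_ones
    · exact (PySem.Set.nodup_ofList l).filter _
    · exact PySem.List.nodup_pyRange_one 1 (m + 1)
    · intro v hv
      rw [List.mem_filter] at hv
      have := hv.2
      rw [hP] at this
      simp only [decide_eq_true_eq] at this
      rw [PySem.List.mem_pyRange_one]
      omega
    · intro v hv hnv
      have hvl : v ∉ l := by
        intro hvl
        apply hnv
        rw [List.mem_filter, PySem.Set.mem_ofList]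
        refine ⟨hvl, ?_⟩
        rw [PySem.List.mem_pyRange_one] at hv
        simp only [hP, decide_eq_true_eq]
        omega
      have h1 : fl.count v = 0 := by
        rw [List.count_eq_zero]
        intro h
        exact hvl (by rw [hl, List.mem_append]; exact Or.inl (List.mem_of_mem_filter h))
      have h2 : e.count v = 0 := by
        rw [List.count_eq_zero]
        intro h
        exact hvl (by rw [hl, List.mem_append]; exact Or.inr h)
      rw [h1, h2]
      simp [Nat.factorial]
-- the two binomial chains of B produce exactly the multinomial weight of combo ++ e
lemma leaf_weight (combo e : List Int) (m : Int) (hm : 1 ≤ m) (mn : Nat) (hmn : (mn : Int) = m)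
    (hev : ∀ x ∈ e, 1 ≤ x ∧ x ≤ m) :
    ChP ((combo.length : Int) + (e.length : Int))
        ((PySem.Set.ofList (combo.filter (fun x => !decide (1 ≤ x ∧ x ≤ m)))).map
          (fun v => (((combo.filter (fun x => !decide (1 ≤ x ∧ x ≤ m))).count v : Nat) : Int)))
      * ChP ((combo.length : Int) + (e.length : Int)
            - ((combo.filter (fun x => !decide (1 ≤ x ∧ x ≤ m))).length : Int))
          (allocs (combo.filter (fun x => decide (1 ≤ x ∧ x ≤ m))) mn e)
      = (WMul (combo ++ e) : Int) := by
  set P : Int → Bool := fun x => decide (1 ≤ x ∧ x ≤ m) with hP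
  set fl := combo.filter P with hfl
  set ol := combo.filter (fun x => !P x) with hol
  set N : Int := (combo.length : Int) + (e.length : Int) with hN
  set ov := (PySem.Set.ofList ol).map (fun v => ((ol.count v : Nat) : Int)) with hov
  have hlen : fl.length + ol.length = combo.length := by
    have := (List.filter_append_perm P combo).length_eq
    simpa [List.length_append] using this
  have hov0 : ∀ a ∈ ov, 0 ≤ a := by
    intro a ha
    rw [hov, List.mem_map] at ha
    obtain ⟨v, _, rfl⟩ := ha
    positivity
  have hovsum : ov.sum = (ol.length : Int) := by
    rw [hov]
    rw [show ((PySem.Set.ofList ol).map (fun v => ((ol.count v : Nat) : Int)))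
        = ((PySem.Set.ofList ol).map (fun v => ol.count v)).map (Nat.cast : Nat → Int) by
      simp [List.map_map, Function.comp_def]]
    rw [← Nat.cast_list_sum, sum_counts_ofList]
  have hN0 : (0 : Int) ≤ N := by rw [hN]; positivity
  have holN : (ol.length : Int) ≤ N := by rw [hN]; push_cast; omega
  have A1 := ChP_eq ov N hov0 (by rw [hovsum]; exact holN) hN0
  rw [hovsum] at A1
  have hPe : ∀ x ∈ e, P x = true := by
    intro x hx
    have := hev x hx
    simp only [hP, decide_eq_true_eq]
    exact this
  have hflP : ∀ x ∈ fl, P x = true := fun x hx => List.of_mem_filter hx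
  have hsum2 : (allocs fl mn e).sum = (fl.length : Int) + (e.length : Int) := by
    rw [allocs_sum, hmn]
    have h1 : fl.countP P = fl.length := List.countP_eq_length.2 hflP
    have h2 : e.countP P = e.length := List.countP_eq_length.2 hPe
    rw [hP] at h1 h2
    rw [h1, h2]
  have A2 := ChP_eq (allocs fl mn e) (N - (ol.length : Int)) (allocs_nonneg fl e mn)
    (by rw [hsum2, hN]; push_cast; omega) (by omega)
  rw [hsum2] at A2
  have hzero : (N - (ol.length : Int) - ((fl.length : Int) + (e.length : Int))).toNat = 0 := by
    rw [hN]; push_cast; omega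
  rw [hzero] at A2
  simp only [Nat.factorial_zero, Nat.cast_one, mul_one] at A2
  -- identify the two factorial products with the two halves of denomN
  have hovmap : (ov.map (fun a => (a.toNat.factorial : Int)))
      = (PySem.Set.ofList ol).map (fun v => (((ol.count v).factorial : Nat) : Int)) := by
    rw [hov, List.map_map]
    apply List.map_congr_left
    intro v _
    simp [Function.comp_def]
  have hap := allocs_factprod fl e mn
  rw [hmn] at hap
  have hds := denomN_split combo e m hm hev
  -- combine
  have hdenom : ((denomN (combo ++ e) : Nat) : Int)
      = (ov.map (fun a => (a.toNat.factorial : Int))).prod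
        * ((allocs fl mn e).map (fun a => (a.toNat.factorial : Int))).prod := by
    rw [hds, hovmap, hap]
  have key : ((denomN (combo ++ e) : Nat) : Int)
        * (ChP N ov * ChP (N - (ol.length : Int)) (allocs fl mn e))
      = ((N.toNat.factorial : Nat) : Int) := by
    rw [hdenom]
    calc (ov.map (fun a => (a.toNat.factorial : Int))).prod
          * ((allocs fl mn e).map (fun a => (a.toNat.factorial : Int))).prod
          * (ChP N ov * ChP (N - (ol.length : Int)) (allocs fl mn e))
        = (ov.map (fun a => (a.toNat.factorial : Int))).prod * ChP N ov
          * (((allocs fl mn e).map (fun a => (a.toNat.factorial : Int))).prod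
              * ChP (N - (ol.length : Int)) (allocs fl mn e)) := by ring
      _ = (ov.map (fun a => (a.toNat.factorial : Int))).prod * ChP N ov
          * (((N - (ol.length : Int)).toNat.factorial : Int)) := by rw [A2]
      _ = ((N.toNat.factorial : Nat) : Int) := A1
  have hlen2 : (combo ++ e).length = N.toNat := by
    rw [hN, List.length_append]; omega
  have hWden : (WMul (combo ++ e) : Int) * ((denomN (combo ++ e) : Nat) : Int)
      = ((N.toNat.factorial : Nat) : Int) := by
    rw [WMul, hlen2]
    rw [← Nat.cast_mul, Nat.div_mul_cancel (by rw [← hlen2]; exact denomN_dvd _)]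
  have hne : ((denomN (combo ++ e) : Nat) : Int) ≠ 0 := by
    have := denomN_pos (combo ++ e)
    positivity
  have := key.trans hWden.symm
  calc ChP N ov * ChP (N - (ol.length : Int)) (allocs fl mn e)
      = ((denomN (combo ++ e) : Nat) : Int)
          * (ChP N ov * ChP (N - (ol.length : Int)) (allocs fl mn e))
          / ((denomN (combo ++ e) : Nat) : Int) := (Int.mul_ediv_cancel_left _ hne).symm
    _ = (WMul (combo ++ e) : Int) * ((denomN (combo ++ e) : Nat) : Int)
          / ((denomN (combo ++ e) : Nat) : Int) := by rw [this]
    _ = (WMul (combo ++ e) : Int) := Int.mul_ediv_cancel _ hne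
lemma sum_flatMap_eq {α : Type} (l : List α) (g : α → List Int) :
    (l.flatMap g).sum = (l.map (fun a => (g a).sum)).sum := by
  rw [List.flatMap_def, List.sum_flatten, List.map_map]
  rfl

-- the state A's pruning corresponds to
def mOf (dice_side : Int) (combo : List Int) : Int :=
  if combo.length = 0 then dice_side else PySem.List.pyGetD combo (-1) 0
def stR (top_num total : Int) (combo : List Int) : Int :=
  if (combo.length : Int) ≤ top_num ∧ top_num ≤ total then top_num - combo.length else 0
def stT (top_num total target : Int) (combo : List Int) : Option Int :=
  if (combo.length : Int) ≤ top_num ∧ top_num ≤ total then some (target - combo.sum) else none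

-- A's backtracking recursion computes the specification sum
lemma A_spec (side k N t : Int) : ∀ (q : Nat) (fuel : Nat) (combo : List Int),
    q ≤ fuel →
    (combo.length : Int) + q = N →
    (∀ x ∈ combo, 0 ≤ x ∧ x ≤ side) →
    ¬((combo.length : Int) = k ∧ combo.sum ≠ t) →
    topSumRec (fuel + 1) side k N t combo
      = SpecSum (mOf side combo) q (stR k N combo) (stT k N t combo) combo := by
  intro q
  induction q with
  | zero =>
    intro fuel combo _ hlen hval hguard
    have hN : (combo.length : Int) = N := by omega
    rw [show topSumRec (fuel + 1) side k N t combo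
        = if (combo.length : Int) = k ∧ combo.sum ≠ t then 0
          else if (combo.length : Int) = N then countCombination side N combo
          else (PySem.List.pyRange 1 ((if combo.length = 0 then side else PySem.List.pyGetD combo (-1) 0) + 1) 1).foldl
            (fun out dice => out + topSumRec fuel side k N t (combo ++ [dice])) 0 from rfl]
    rw [if_neg hguard, if_pos hN]
    rw [countCombination_eq side N combo hval hN]
    rw [SpecSum]
    rw [show Exts (mOf side combo) 0 = [[]] from rfl]
    simp only [List.map_cons, List.map_nil, List.sum_cons, List.sum_nil, add_zero, List.append_nil]
    have hcond : condB (stR k N combo) (stT k N t combo) [] = true := by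
      unfold stR stT condB
      by_cases hc : (combo.length : Int) ≤ k ∧ k ≤ N
      · rw [if_pos hc, if_pos hc]
        have hk : k = (combo.length : Int) := by omega
        have hst : combo.sum = t := by
          by_contra hne
          exact hguard ⟨hk.symm, hne⟩
        simp [hst]
      · rw [if_neg hc, if_neg hc]
    rw [if_pos hcond]
  | succ q ih =>
    intro fuel combo hfuel hlen hval hguard
    obtain ⟨fuel', rfl⟩ : ∃ fuel', fuel = fuel' + 1 := ⟨fuel - 1, by omega⟩
    have hlenN : ¬((combo.length : Int) = N) := by omega
    rw [show topSumRec (fuel' + 1 + 1) side k N t combo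
        = if (combo.length : Int) = k ∧ combo.sum ≠ t then 0
          else if (combo.length : Int) = N then countCombination side N combo
          else (PySem.List.pyRange 1 ((if combo.length = 0 then side else PySem.List.pyGetD combo (-1) 0) + 1) 1).foldl
            (fun out dice => out + topSumRec (fuel' + 1) side k N t (combo ++ [dice])) 0 from rfl]
    rw [if_neg hguard, if_neg hlenN]
    rw [PySem.List.foldl_add (g := fun dice => topSumRec (fuel' + 1) side k N t (combo ++ [dice]))]
    rw [zero_add]
    -- RHS
    rw [SpecSum, show Exts (mOf side combo) (q + 1)
        = (PySem.List.pyRange 1 (mOf side combo + 1) 1).flatMap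
            (fun d => (Exts d q).map (d :: ·)) from rfl]
    rw [List.map_flatMap, sum_flatMap_eq]
    rw [show (if combo.length = 0 then side else PySem.List.pyGetD combo (-1) 0) = mOf side combo from rfl]
    apply congrArg
    apply List.map_congr_left
    intro d hd
    rw [PySem.List.mem_pyRange_one] at hd
    -- facts about the child
    have hdm : d ≤ side := by
      by_cases h0 : combo.length = 0
      · have : mOf side combo = side := by rw [mOf, if_pos h0]
        omega
      · have hne : combo ≠ [] := by
          intro h; rw [h] at h0; simp at h0
        have : mOf side combo = combo.getLast hne := by
          rw [mOf, if_neg h0]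
          exact PySem.List.pyGetD_neg_one combo 0 hne
        have hmem := List.getLast_mem hne
        have := hval _ hmem
        omega
    have hvalc : ∀ x ∈ combo ++ [d], 0 ≤ x ∧ x ≤ side := by
      intro x hx
      rcases List.mem_append.1 hx with h | h
      · exact hval x h
      · rcases List.mem_singleton.1 h with rfl
        omega
    have hlenc : ((combo ++ [d]).length : Int) + q = N := by
      simp only [List.length_append, List.length_cons, List.length_nil]
      push_cast
      push_cast at hlen
      omega
    have hsumc : (combo ++ [d]).sum = combo.sum + d := by
      rw [List.sum_append]; simp
    have hlc : ((combo ++ [d]).length : Int) = (combo.length : Int) + 1 := by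
      simp only [List.length_append, List.length_cons, List.length_nil]
      push_cast
      ring
    have hmc : mOf side (combo ++ [d]) = d := by
      rw [mOf, if_neg (by simp)]
      exact PySem.List.pyGetD_neg_one_append_singleton combo d 0
    have hmap : ∀ e' ∈ Exts d q,
        (if condB (stR k N combo) (stT k N t combo) (d :: e') then (WMul (combo ++ (d :: e')) : Int) else 0)
        = (if ¬((combo.length : Int) + 1 = k ∧ combo.sum + d ≠ t)
            then (if condB (stR k N (combo ++ [d])) (stT k N t (combo ++ [d])) e'
              then (WMul ((combo ++ [d]) ++ e') : Int) else 0)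
            else 0) := by
      intro e' _
      have hW : WMul (combo ++ (d :: e')) = WMul ((combo ++ [d]) ++ e') := by
        rw [List.append_assoc, List.singleton_append]
      by_cases hb : ((combo.length : Int) + 1 = k) ∧ combo.sum + d ≠ t
      · -- the child is pruned: the parent condition fails on d :: e'
        rw [if_neg (not_not_intro hb)]
        have hcp : (combo.length : Int) ≤ k ∧ k ≤ N := by
          push_cast at hlen
          omega
        have hfalse : condB (stR k N combo) (stT k N t combo) (d :: e') = false := by
          unfold stR stT condB
          rw [if_pos hcp, if_pos hcp]
          have h1 : (k - (combo.length : Int)).toNat = 1 := by omega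
          rw [h1]
          simp only [List.take_succ_cons, List.take_zero, List.sum_cons, List.sum_nil, add_zero,
            decide_eq_false_iff_not]
          omega
        rw [hfalse]
        simp
      · rw [if_pos hb]
        have hceq : condB (stR k N combo) (stT k N t combo) (d :: e')
            = condB (stR k N (combo ++ [d])) (stT k N t (combo ++ [d])) e' := by
          by_cases hcp : (combo.length : Int) ≤ k ∧ k ≤ N
          · by_cases hkl : k = (combo.length : Int)
            · have hst : combo.sum = t := by
                by_contra hne
                exact hguard ⟨hkl.symm, hne⟩
              unfold stR stT condB
              rw [if_pos hcp, if_pos hcp, hlc, if_neg (by omega), if_neg (by omega)]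
              have h0 : (k - (combo.length : Int)).toNat = 0 := by omega
              rw [h0]
              simp [hst]
            · have hcpc : ((combo.length : Int) + 1 ≤ k) ∧ k ≤ N := by omega
              unfold stR stT condB
              rw [if_pos hcp, if_pos hcp, hlc, if_pos hcpc, if_pos hcpc]
              have htake : (k - (combo.length : Int)).toNat
                  = (k - ((combo.length : Int) + 1)).toNat + 1 := by omega
              rw [htake, List.take_succ_cons]
              simp only [List.sum_cons, hsumc]
              apply decide_eq_decide.2
              omega
          · have hcc2 : ¬(((combo.length : Int) + 1 ≤ k) ∧ k ≤ N) := by omega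
            unfold stR stT condB
            rw [if_neg hcp, if_neg hcp, hlc, if_neg hcc2, if_neg hcc2]
        rw [hceq, hW]
    rw [List.map_map]
    simp only [Function.comp_def]
    rw [List.map_congr_left hmap]
    by_cases hgc : ((combo.length : Int) + 1 = k) ∧ combo.sum + d ≠ t
    · -- the child is pruned: its recursion returns 0 and every term is 0
      have hA : topSumRec (fuel' + 1) side k N t (combo ++ [d]) = 0 := by
        rw [show topSumRec (fuel' + 1) side k N t (combo ++ [d])
            = if ((combo ++ [d]).length : Int) = k ∧ (combo ++ [d]).sum ≠ t then 0
              else if ((combo ++ [d]).length : Int) = N then countCombination side N (combo ++ [d])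
              else (PySem.List.pyRange 1 ((if (combo ++ [d]).length = 0 then side
                  else PySem.List.pyGetD (combo ++ [d]) (-1) 0) + 1) 1).foldl
                (fun out dice => out + topSumRec fuel' side k N t ((combo ++ [d]) ++ [dice])) 0 from
          (by cases fuel' <;> rfl)]
        rw [if_pos (by rw [hlc, hsumc]; exact hgc)]
      rw [hA]
      symm
      apply List.sum_eq_zero
      intro x hx
      rw [List.mem_map] at hx
      obtain ⟨e', _, rfl⟩ := hx
      rw [if_neg (not_not_intro hgc)]
    · -- live child: apply the induction hypothesis
      have hguardc : ¬(((combo ++ [d]).length : Int) = k ∧ (combo ++ [d]).sum ≠ t) := by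
        rw [hlc, hsumc]; exact hgc
      rw [ih fuel' (combo ++ [d]) (by omega) hlenc hvalc hguardc]
      rw [SpecSum, hmc]
      apply congrArg
      apply List.map_congr_left
      intro e' _
      rw [if_pos hgc]
lemma topSumRec_succ (fuel : Nat) (side k N t : Int) (combo : List Int) :
    topSumRec (fuel + 1) side k N t combo
      = if (combo.length : Int) = k ∧ combo.sum ≠ t then 0
        else if (combo.length : Int) = N then countCombination side N combo
        else (PySem.List.pyRange 1 ((if combo.length = 0 then side
            else PySem.List.pyGetD combo (-1) 0) + 1) 1).foldl
          (fun out dice => out + topSumRec fuel side k N t (combo ++ [dice])) 0 := rfl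

-- a list of dice values in 1..m has sum between its length and length * m
lemma sum_bounds (l : List Int) (m : Int) (h : ∀ x ∈ l, 1 ≤ x ∧ x ≤ m) :
    (l.length : Int) ≤ l.sum ∧ l.sum ≤ (l.length : Int) * m := by
  induction l with
  | nil => simp
  | cons x l ih =>
    obtain ⟨h1, h2⟩ := h x (by simp)
    obtain ⟨h3, h4⟩ := ih (fun y hy => h y (by simp [hy]))
    simp only [List.length_cons, List.sum_cons]
    push_cast
    constructor
    · omega
    · have : ((l.length : Int) + 1) * m = (l.length : Int) * m + m := by ring
      omega

-- an unreachable required top sum makes the whole specification sum vanish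
lemma SpecSum_zero_of_infeasible (m : Int) (q : Nat) (r tv : Int) (pre : List Int)
    (hr0 : 0 ≤ r) (hrq : r ≤ (q : Int)) (hbad : ¬(r ≤ tv ∧ tv ≤ r * m)) :
    SpecSum m q r (some tv) pre = 0 := by
  rw [SpecSum]
  apply List.sum_eq_zero
  intro x hx
  rw [List.mem_map] at hx
  obtain ⟨e, he, rfl⟩ := hx
  obtain ⟨hlen, hbnd⟩ := mem_Exts m q e he
  suffices h : condB r (some tv) e = false by rw [h]; simp
  unfold condB
  simp only [decide_eq_false_iff_not]
  intro hsum
  have hbt : ∀ x ∈ e.take r.toNat, 1 ≤ x ∧ x ≤ m :=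
    fun x hx => hbnd x (List.mem_of_mem_take hx)
  have hlt : ((e.take r.toNat).length : Int) = r := by
    rw [List.length_take, hlen]
    omega
  obtain ⟨hb1, hb2⟩ := sum_bounds (e.take r.toNat) m hbt
  rw [hlt, hsum] at hb1 hb2
  exact hbad ⟨hb1, hb2⟩

-- B's main branch computes the specification sum
lemma B_main (k N t m : Int) (combo : List Int) (hm1 : 1 ≤ m) (hlt : (combo.length : Int) < N) :
    (let n : Int := combo.length
     let s : Int := combo.sum
     let L := N - n
     let bo := combo.foldl
        (fun (p : PySem.Dict Int Int × PySem.Dict Int Int) x =>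
          if 1 ≤ x ∧ x ≤ m then (p.1.insert x (p.1.getD x 0 + 1), p.2)
          else (p.1, p.2.insert x (p.2.getD x 0 + 1)))
        (PySem.Dict.empty, PySem.Dict.empty)
     let Fs := bo.2.values.foldl (fun (q : Int × Int) c => (q.1 * pyComb q.2 c, q.2 - c)) (1, N)
     let n_out_slots := Fs.2
     let rt : Int × Option Int :=
        if n ≤ k ∧ k ≤ N then (k - n, some (t - s)) else (0, none)
     let bad : Bool := match rt.2 with
       | some tv => decide (¬(rt.1 ≤ tv ∧ tv ≤ rt.1 * m))
       | none => false
     if bad then 0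
     else
     let init : PySem.Dict (Int × Int × Option Int) Int := PySem.Dict.empty.insert (0, rt.1, rt.2) 1
     let fin := (PySem.List.pyRange m 0 (-1)).foldl
        (fun (st : PySem.Dict (Int × Int × Option Int) Int × Int) v =>
          let bv := bo.1.getD v 0
          let new := st.1.items.foldl
            (fun nd (kw : (Int × Int × Option Int) × Int) =>
              (PySem.List.pyRange 0 (L - kw.1.1 + 1) 1).foldl
                (fun nd c =>
                  let use := min c kw.1.2.1
                  let t2 := kw.1.2.2.map (fun x => x - v * use)
                  let key := (kw.1.1 + c, kw.1.2.1 - use, t2)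
                  nd.insert key (nd.getD key 0 + kw.2 * pyComb (n_out_slots - st.2 - kw.1.1) (bv + c)))
                nd)
            PySem.Dict.empty
          (new, st.2 + bv))
        (init, 0)
     let out := fin.1.items.foldl
        (fun acc (kw : (Int × Int × Option Int) × Int) =>
          if kw.1.1 = L ∧ (kw.1.2.2 = none ∨ kw.1.2.2 = some 0) then acc + kw.2 else acc) 0
     Fs.1 * out)
    = SpecSum m (N - (combo.length : Int)).toNat (stR k N combo) (stT k N t combo) combo := by
  simp only []
  rw [bo_split m combo PySem.Dict.empty PySem.Dict.empty]
  rw [PySem.Dict.foldl_insert_getD_add_one_eq_counter, PySem.Dict.foldl_insert_getD_add_one_eq_counter]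
  simp only []
  have hvals : (PySem.Dict.counter (combo.filter (fun x => !decide (1 ≤ x ∧ x ≤ m)))).values
      = (PySem.Set.ofList (combo.filter (fun x => !decide (1 ≤ x ∧ x ≤ m)))).map
          (fun v => (((combo.filter (fun x => !decide (1 ≤ x ∧ x ≤ m))).count v : Nat) : Int)) := by
    show ((PySem.Dict.counter _).items).map (·.2) = _
    rw [PySem.Dict.items_counter]
    simp [List.map_map, Function.comp_def]
  rw [hvals, fold_FCHP]
  simp only []
  set fl := combo.filter (fun x => decide (1 ≤ x ∧ x ≤ m)) with hfl
  set ol := combo.filter (fun x => !decide (1 ≤ x ∧ x ≤ m)) with hol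
  set ov := (PySem.Set.ofList ol).map (fun v => ((ol.count v : Nat) : Int)) with hov
  have hovsum : ov.sum = (ol.length : Int) := by
    rw [hov]
    rw [show ((PySem.Set.ofList ol).map (fun v => ((ol.count v : Nat) : Int)))
        = ((PySem.Set.ofList ol).map (fun v => ol.count v)).map (Nat.cast : Nat → Int) by
      simp [List.map_map, Function.comp_def]]
    rw [← Nat.cast_list_sum, sum_counts_ofList]
  rw [hovsum]
  have hrt : (if (combo.length : Int) ≤ k ∧ k ≤ N then ((k - (combo.length : Int), some (t - combo.sum)) : Int × Option Int) else (0, none))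
      = (stR k N combo, stT k N t combo) := by
    unfold stR stT
    by_cases hc : (combo.length : Int) ≤ k ∧ k ≤ N
    · rw [if_pos hc, if_pos hc, if_pos hc]
    · rw [if_neg hc, if_neg hc, if_neg hc]
  rw [hrt]
  simp only []
  by_cases hbad : (match (stR k N combo, stT k N t combo).2 with
      | some tv => decide (¬((stR k N combo, stT k N t combo).1 ≤ tv
          ∧ tv ≤ (stR k N combo, stT k N t combo).1 * m))
      | none => false) = true
  · rw [if_pos hbad]
    simp only [] at hbad
    by_cases hc : (combo.length : Int) ≤ k ∧ k ≤ N
    · have hsT : stT k N t combo = some (t - combo.sum) := by rw [stT, if_pos hc]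
      have hsR : stR k N combo = k - (combo.length : Int) := by rw [stR, if_pos hc]
      rw [hsT] at hbad
      simp only [decide_eq_true_eq] at hbad
      symm
      rw [hsT]
      apply SpecSum_zero_of_infeasible
      · rw [hsR]; omega
      · rw [hsR]; omega
      · rw [hsR]; rw [hsR] at hbad; exact hbad
    · have hsT : stT k N t combo = none := by rw [stT, if_neg hc]
      rw [hsT] at hbad
      simp at hbad
  rw [if_neg hbad]
  -- the layered loop
  have hmnat : ((m.toNat : Nat) : Int) = m := Int.toNat_of_nonneg (by omega)
  have hpb0 : (0 : Int) = pbF fl ((m.toNat : Nat) : Int) := by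
    have hc0 : fl.countP (fun x => decide (((m.toNat : Nat) : Int) < x)) = 0 := by
      rw [List.countP_eq_zero]
      intro x hx
      have := List.of_mem_filter hx
      simp only [decide_eq_true_eq] at this ⊢
      omega
    rw [pbF, hc0]
    rfl
  have hinitnd : (PySem.Dict.empty.insert ((0 : Int), stR k N combo, stT k N t combo) (1 : Int)).keys.Nodup :=
    PySem.Dict.nodup_keys_insert _ _ _ PySem.Dict.nodup_keys_empty
  have hle := loop_eq fl (N - (combo.length : Int)) (N - (ol.length : Int)) (PySem.Dict.counter fl)
    (fun w => PySem.Dict.getD_counter fl w) m.toNat 0 hpb0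
    (PySem.Dict.empty.insert ((0 : Int), stR k N combo, stT k N t combo) (1 : Int)) hinitnd
  rw [hmnat] at hle
  rw [hle]
  -- the initial dict has a single item
  have hinit : (PySem.Dict.empty.insert ((0 : Int), stR k N combo, stT k N t combo) (1 : Int)).items
      = [(((0 : Int), stR k N combo, stT k N t combo), (1 : Int))] := by
    rw [PySem.Dict.items_insert_of_not_contains _ _ (PySem.Dict.contains_empty _)]
    rfl
  rw [hinit]
  simp only [sumItems, List.map_cons, List.map_nil, List.sum_cons, List.sum_nil, add_zero]
  -- the DP recursion in closed form
  have hr0 : (0 : Int) ≤ stR k N combo := by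
    unfold stR
    by_cases hc : (combo.length : Int) ≤ k ∧ k ≤ N
    · rw [if_pos hc]; omega
    · rw [if_neg hc]
  rw [gSpec_eq fl (N - (combo.length : Int)) (N - (ol.length : Int)) m.toNat 0
    (stR k N combo) (stT k N t combo) le_rfl (by omega) hr0]
  have hpbm : pbF fl m = 0 := by
    rw [← hmnat]
    exact hpb0.symm
  rw [hmnat, hpbm]
  simp only [sub_zero]
  rw [one_mul, one_mul, ← List.sum_map_mul_left]
  rw [SpecSum]
  apply congrArg
  apply List.map_congr_left
  intro e he
  obtain ⟨helen, hev⟩ := mem_Exts m _ e he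
  rw [mul_ite, mul_zero]
  by_cases hcb : condB (stR k N combo) (stT k N t combo) e = true
  · rw [if_pos hcb, if_pos hcb]
    have hNe : N = (combo.length : Int) + (e.length : Int) := by
      rw [helen]
      omega
    rw [hNe]
    exact leaf_weight combo e m hm1 m.toNat hmnat hev
  · rw [Bool.not_eq_true] at hcb
    rw [hcb]
    simp

-- ===== VERDICT (by name: the statement is the Claim_ definition above) =====
theorem top_sum_spec : Claim_equal_top_sum := by
  unfold Claim_equal_top_sum
  intro side k N t combo _ hpre
  unfold Spec_top_sum
  rw [top_sum]
  simp only [top_sum_alt]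
  by_cases hb1 : (combo.length : Int) = k ∧ combo.sum ≠ t
  · rw [topSumRec_succ, if_pos hb1, if_pos hb1]
  · rw [topSumRec_succ, if_neg hb1, if_neg hb1]
    by_cases h2 : (combo.length : Int) = N
    · rw [if_pos h2, if_pos h2]
      have hval : ∀ x ∈ combo, 0 ≤ x ∧ x ≤ side := by
        rcases hpre with h | h | h | h
        · exact absurd h hb1
        · exact h.2
        · exact absurd h2 h.1
        · exact absurd h2 (by omega)
      rw [countCombination_eq side N combo hval h2]
      rw [PySem.Dict.foldl_insert_getD_add_one_eq_counter]
      rw [← h2]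
      exact (alt_multinomial combo).symm
    · rw [if_neg h2, if_neg h2]
      have hmm : (if (combo.length : Int) = 0 then side else PySem.List.pyGetD combo (-1) 0)
          = mOf side combo := by
        rw [mOf]
        by_cases h0 : combo.length = 0
        · rw [if_pos h0, if_pos (by exact_mod_cast h0)]
        · rw [if_neg h0, if_neg (by exact_mod_cast h0)]
      rw [hmm]
      by_cases hm : mOf side combo ≤ 0
      · rw [if_pos hm]
        rw [show (if combo.length = 0 then side else PySem.List.pyGetD combo (-1) 0)
            = mOf side combo from rfl]
        rw [PySem.List.pyRange_one_eq_nil (by omega)]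
        rfl
      · rw [if_neg hm]
        have hmain : (combo.length : Int) < N ∧ ∀ x ∈ combo, 0 ≤ x ∧ x ≤ side := by
          rcases hpre with h | h | h | h
          · exact absurd h hb1
          · exact absurd h.1 h2
          · exact absurd h.2 hm
          · exact h
        have hL : ¬(N - (combo.length : Int) < 0) := by omega
        rw [if_neg hL]
        have hAspec := A_spec side k N t ((N - (combo.length : Int)).toNat)
          ((N - (combo.length : Int)).toNat) combo le_rfl (by omega) hmain.2 hb1
        rw [topSumRec_succ, if_neg hb1, if_neg h2] at hAspec
        rw [hAspec]
        exact (B_main k N t (mOf side combo) combo (by omega) hmain.1).symm
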